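-- pv_equiv track=rewrite | github.com/sylvanus4/github-to-notion-sync | .cursor/skills/md-enhance-publish/scripts/convert_for_notion.py | convert_pipe_tables
-- ===== SOURCE A (Python) =====
-- def _parse_row(line: str) -> list[str]:
--     """Split a pipe-delimited row into cell contents."""
--     cells = line.strip().strip("|").split("|")
--     return [c.strip() for c in cells]
--
-- def _is_separator(line: str) -> bool:
--     """Check if a line is a markdown table separator (|---|---|)."""
--     stripped = line.strip()
--     return bool(stripped) and all(c in "-| :" for c in stripped)
--
-- def convert_pipe_tables(content: str) -> str:
--     """Transform markdown pipe tables into Notion <table> HTML blocks.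
--
--     Tables inside fenced code blocks are preserved unchanged.
--     """
--     lines = content.split("\n")
--     result: list[str] = []
--     i = 0
--     in_code_block = False
--
--     while i < len(lines):
--         line = lines[i]
--
--         if line.strip().startswith("```"):
--             in_code_block = not in_code_block
--             result.append(line)
--             i += 1
--             continue
--
--         if in_code_block:
--             result.append(line)
--             i += 1
--             continue
--
--         if (
--             "|" in line
--             and line.strip().startswith("|")
--             and line.strip().endswith("|")
--         ):
--             table_lines: list[str] = []
--             while (
--                 i < len(lines)
--                 and lines[i].strip().startswith("|")
--                 and lines[i].strip().endswith("|")
--             ):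
--                 table_lines.append(lines[i])
--                 i += 1
--
--             if len(table_lines) >= 2:
--                 header_cells = _parse_row(table_lines[0])
--
--                 has_header = len(table_lines) >= 2 and _is_separator(
--                     table_lines[1]
--                 )
--
--                 data_start = 2 if has_header else 1
--
--                 html = (
--                     f'<table header-row="{"true" if has_header else "false"}">\n'
--                 )
--
--                 if has_header:
--                     html += "\t<tr>\n"
--                     for cell in header_cells:
--                         html += f"\t\t<td>**{cell}**</td>\n"
--                     html += "\t</tr>\n"
--
--                 for data_line in table_lines[data_start:]:
--                     cells = _parse_row(data_line)
--                     html += "\t<tr>\n"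
--                     for cell in cells:
--                         html += f"\t\t<td>{cell}</td>\n"
--                     html += "\t</tr>\n"
--
--                 html += "</table>"
--                 result.append(html)
--             else:
--                 result.extend(table_lines)
--         else:
--             result.append(line)
--             i += 1
--
--     return "\n".join(result)
-- ===== SOURCE B (Python) =====
-- def _cells(line: str) -> list[str]:
--     return [c.strip() for c in line.strip().strip("|").split("|")]
--
-- def _is_sep(line: str) -> bool:
--     s = line.strip()
--     return bool(s) and all(c in "-| :" for c in s)
--
-- def _row_lines(cells: list[str], mark: str) -> list[str]:
--     return ["\t<tr>"] + [f"\t\t<td>{mark}{c}{mark}</td>" for c in cells] + ["\t</tr>"]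
--
-- def _render_table(rows: list[str]) -> str:
--     has_header = _is_sep(rows[1])
--     parts = [f'<table header-row="{"true" if has_header else "false"}">']
--     if has_header:
--         parts += _row_lines(_cells(rows[0]), "**")
--         body = rows[2:]
--     else:
--         body = rows[1:]
--     for r in body:
--         parts += _row_lines(_cells(r), "")
--     parts.append("</table>")
--     return "\n".join(parts)
--
-- def convert_pipe_tables(content: str) -> str:
--     out: list[str] = []
--     buf: list[str] = []
--     in_code = False
--     for line in content.split("\n"):
--         s = line.strip()
--         if not in_code and s.startswith("|") and s.endswith("|"):
--             buf.append(line)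
--             continue
--         if len(buf) >= 2:
--             out.append(_render_table(buf))
--         else:
--             out.extend(buf)
--         buf = []
--         out.append(line)
--         if s.startswith("```"):
--             in_code = not in_code
--     if len(buf) >= 2:
--         out.append(_render_table(buf))
--     else:
--         out.extend(buf)
--     return "\n".join(out)
-- ===== Notes on version B (the rewrite author's own statement) =====
-- stated objective: alternative
-- what changed: A's index-driven outer while with a nested table-consuming inner while and string-concatenation HTML building is replaced by a single for-loop over the lines that maintains an in_code flag and a pending-table buffer flushed at each non-table line and at the end, with each <table> block assembled as a list of lines joined once by newline.
import Mathlib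
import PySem

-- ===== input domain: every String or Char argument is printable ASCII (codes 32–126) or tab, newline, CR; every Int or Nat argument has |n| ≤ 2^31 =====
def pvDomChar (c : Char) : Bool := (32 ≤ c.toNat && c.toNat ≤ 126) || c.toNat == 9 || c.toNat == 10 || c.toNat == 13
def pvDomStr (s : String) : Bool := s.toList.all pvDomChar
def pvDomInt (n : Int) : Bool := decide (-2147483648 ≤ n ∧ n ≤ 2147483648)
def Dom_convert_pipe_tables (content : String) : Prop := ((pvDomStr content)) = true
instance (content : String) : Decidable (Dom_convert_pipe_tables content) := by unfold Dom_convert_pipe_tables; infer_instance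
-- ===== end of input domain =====

-- B replaces A's index-driven outer while + inner table-consuming while by a single pass that
-- maintains a pending-table buffer (flushed at every non-table line and at the end), and builds
-- each <table> block as a list of lines joined with "\n" instead of string concatenation (objective: alternative).

-- ===== PORT A =====
-- line.strip().strip("|").split("|") with each cell stripped  (= _parse_row)
def parseRowA (line : List Char) : List (List Char) :=
  (PySem.Chars.splitOn (PySem.Chars.stripChars (PySem.Chars.strip line) ['|']) ['|']).map
    PySem.Chars.strip

-- _is_separator: nonempty strip, all chars in "-| :"  (membership in a 4-char literal, ported as the 4-way disjunction)
def isSeparatorA (line : List Char) : Bool :=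
  let st := PySem.Chars.strip line
  !st.isEmpty && st.all (fun c => c == '-' || c == '|' || c == ' ' || c == ':')

-- the inner while's condition: lines[i].strip() starts and ends with "|"
def tableLineA (line : List Char) : Bool :=
  PySem.Chars.startswith (PySem.Chars.strip line) ['|'] &&
    PySem.Chars.endswith (PySem.Chars.strip line) ['|']

-- the outer if's condition: "|" in line and strip starts/ends with "|"
def tableCondA (line : List Char) : Bool :=
  PySem.Chars.isIn ['|'] line && tableLineA line

-- the html-building block of A, += transliterated as foldl string append
-- (called only with 2 ≤ table_lines.length, so the getD defaults are unreachable)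
def renderA (table_lines : List (List Char)) : List Char :=
  let header_cells := parseRowA (table_lines.getD 0 [])
  let has_header := decide (2 ≤ table_lines.length) && isSeparatorA (table_lines.getD 1 [])
  let data_start := if has_header then 2 else 1
  let html := "<table header-row=\"".toList ++
    (if has_header then "true".toList else "false".toList) ++ "\">\n".toList
  let html := if has_header then
      (header_cells.foldl
        (fun acc cell => acc ++ "\t\t<td>**".toList ++ cell ++ "**</td>\n".toList)
        (html ++ "\t<tr>\n".toList)) ++ "\t</tr>\n".toList
    else html
  let html := (table_lines.drop data_start).foldl
    (fun acc dl =>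
      ((parseRowA dl).foldl
        (fun a cell => a ++ "\t\t<td>".toList ++ cell ++ "</td>\n".toList)
        (acc ++ "\t<tr>\n".toList)) ++ "\t</tr>\n".toList)
    html
  html ++ "</table>".toList

-- the outer while over i; the inner while is the take/drop of the run of table lines
-- (the outer condition tableCondA implies the inner condition tableLineA on `line`, so the
-- inner while always consumes `line` first — hence the `line ::` / recursion on the dropWhile)
def goA (inCode : Bool) (lines : List (List Char)) : List (List Char) :=
  match lines with
  | [] => []
  | line :: rest =>
    if PySem.Chars.startswith (PySem.Chars.strip line) ['`', '`', '`'] then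
      line :: goA (!inCode) rest
    else if inCode then
      line :: goA inCode rest
    else if tableCondA line then
      let table_lines := line :: rest.takeWhile tableLineA
      (if 2 ≤ table_lines.length then [renderA table_lines] else table_lines) ++
        goA inCode (rest.dropWhile tableLineA)
    else
      line :: goA inCode rest
termination_by lines.length
decreasing_by
  · simp
  · simp
  · simpa using Nat.lt_succ_of_le (List.length_dropWhile_le _ _)
  · simp

def convert_pipe_tables (content : String) : String :=
  String.ofList (PySem.Chars.join ['\n'] (goA false (PySem.Chars.splitOn content.toList ['\n'])))

-- ===== PORT B =====
-- _cells
def cellsB (line : List Char) : List (List Char) :=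
  (PySem.Chars.splitOn (PySem.Chars.stripChars (PySem.Chars.strip line) ['|']) ['|']).map
    PySem.Chars.strip

-- _is_sep
def isSepB (line : List Char) : Bool :=
  let s := PySem.Chars.strip line
  !s.isEmpty && s.all (fun c => c == '-' || c == '|' || c == ' ' || c == ':')

-- _row_lines
def rowLinesB (cells : List (List Char)) (mark : List Char) : List (List Char) :=
  "\t<tr>".toList ::
    (cells.map (fun c => "\t\t<td>".toList ++ mark ++ c ++ mark ++ "</td>".toList) ++
      ["\t</tr>".toList])

-- _render_table: list of lines, joined once (rows always has 2 ≤ length when called)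
def renderB (rows : List (List Char)) : List Char :=
  let has_header := isSepB (rows.getD 1 [])
  let parts := ["<table header-row=\"".toList ++
    (if has_header then "true".toList else "false".toList) ++ "\">".toList]
  let parts := if has_header then parts ++ rowLinesB (cellsB (rows.getD 0 [])) "**".toList
    else parts
  let body := if has_header then rows.drop 2 else rows.drop 1
  let parts := body.foldl (fun ps r => ps ++ rowLinesB (cellsB r) []) parts
  PySem.Chars.join ['\n'] (parts ++ ["</table>".toList])

-- the flush: emit the converted table for 2+ buffered lines, else the raw lines
def flushB (buf : List (List Char)) : List (List Char) :=
  if 2 ≤ buf.length then [renderB buf] else buf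

-- one iteration of B's for-loop; state = (in_code, buf, out)
def stepB (st : Bool × List (List Char) × List (List Char)) (line : List Char) :
    Bool × List (List Char) × List (List Char) :=
  let (inCode, buf, out) := st
  let s := PySem.Chars.strip line
  if !inCode && PySem.Chars.startswith s ['|'] && PySem.Chars.endswith s ['|'] then
    (inCode, buf ++ [line], out)
  else
    (if PySem.Chars.startswith s ['`', '`', '`'] then !inCode else inCode, [],
      out ++ flushB buf ++ [line])

def convert_pipe_tables_alt (content : String) : String :=
  let st := (PySem.Chars.splitOn content.toList ['\n']).foldl stepB (false, [], [])
  String.ofList (PySem.Chars.join ['\n'] (st.2.2 ++ flushB st.2.1))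

-- ===== PRECONDITION & SPEC =====
def Spec_convert_pipe_tables (content : String) (out : String) : Prop := out = convert_pipe_tables_alt content
instance (content : String) (out : String) : Decidable (Spec_convert_pipe_tables content out) := by unfold Spec_convert_pipe_tables; infer_instance

-- ===== CLAIM (what is proved, stated in full; the proofs are below) =====
def Claim_equal_convert_pipe_tables : Prop := ∀ (content : String), Dom_convert_pipe_tables content → Spec_convert_pipe_tables content (convert_pipe_tables content)

-- ===== LEMMAS AND PROOFS =====

lemma strip_infix (l : List Char) : PySem.Chars.strip l <:+: l := by
  have h1 : PySem.Chars.lstrip l <:+ l := List.dropWhile_suffix _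
  have h2 : PySem.Chars.rstrip (PySem.Chars.lstrip l) <+: PySem.Chars.lstrip l := by
    have := List.dropWhile_suffix (l := (PySem.Chars.lstrip l).reverse) PySem.Chars.isspace
    simpa [PySem.Chars.rstrip, List.reverse_suffix] using this.reverse
  exact h2.isInfix.trans h1.isInfix

lemma cond_eq (l : List Char) : tableCondA l = tableLineA l := by
  unfold tableCondA
  cases h : tableLineA l with
  | false => simp
  | true =>
    have hs : PySem.Chars.startswith (PySem.Chars.strip l) ['|'] = true := by
      unfold tableLineA at h; exact (Bool.and_eq_true _ _).mp h |>.1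
    have hp : ('|' : Char) ∈ PySem.Chars.strip l := by
      rcases (PySem.Chars.startswith_iff _ _).mp hs with ⟨t, ht⟩
      rw [← ht]; simp
    have hmem : ('|' : Char) ∈ l := (strip_infix l).subset hp
    simp [(PySem.Chars.isIn_iff_infix _ _).mpr ((List.singleton_infix_iff _ _).mpr hmem)]

lemma table_not_fence (l : List Char) (h : tableLineA l = true) :
    PySem.Chars.startswith (PySem.Chars.strip l) ['`', '`', '`'] = false := by
  have hs : PySem.Chars.startswith (PySem.Chars.strip l) ['|'] = true := by
    unfold tableLineA at h; exact (Bool.and_eq_true _ _).mp h |>.1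
  by_contra hb
  rw [Bool.not_eq_false] at hb
  rcases (PySem.Chars.startswith_iff _ _).mp hs with ⟨t, ht⟩
  rcases (PySem.Chars.startswith_iff _ _).mp hb with ⟨u, hu⟩
  rw [← ht] at hu
  simp at hu

-- the two row/separator helpers and the two cell parsers are the same function
lemma cells_eq : parseRowA = cellsB := rfl
lemma sep_eq : isSeparatorA = isSepB := rfl

-- concatenation of lines, each terminated by a newline
def LC (parts : List (List Char)) : List Char := parts.flatMap (fun p => p ++ ['\n'])

lemma join_last : ∀ (parts : List (List Char)) (last : List Char),
    PySem.Chars.join ['\n'] (parts ++ [last]) = LC parts ++ last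
  | [], last => by simp [PySem.Chars.join, LC, List.intercalate]
  | p :: ps, last => by
    cases ps with
    | nil =>
      rw [List.singleton_append, PySem.Chars.join_cons_cons]
      simp [PySem.Chars.join, LC, List.intercalate]
    | cons q qs =>
      rw [List.cons_append, List.cons_append, PySem.Chars.join_cons_cons,
        ← List.cons_append, join_last (q :: qs) last]
      simp [LC]

lemma render_eq (rows : List (List Char)) (h : 2 ≤ rows.length) :
    renderA rows = renderB rows := by
  have hd : decide (2 ≤ rows.length) = true := by simpa using h
  simp only [renderA, renderB, cells_eq, sep_eq, hd, Bool.true_and,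
    PySem.List.foldl_append_eq_flatMap, List.append_assoc]
  by_cases hh : isSepB (rows.getD 1 []) = true <;>
    simp only [hh, if_true, if_false, Bool.false_eq_true] <;>
    · simp only [← List.append_assoc]
      rw [join_last]
      simp [LC, rowLinesB, List.flatMap_append, List.flatMap_cons, List.flatMap_map, List.flatMap_assoc,
        List.append_assoc, List.cons_append, List.nil_append]

lemma goA_nil (c : Bool) : goA c [] = [] := by rw [goA]

lemma goA_cons (c : Bool) (line : List Char) (rest : List (List Char)) :
    goA c (line :: rest) =
    (if PySem.Chars.startswith (PySem.Chars.strip line) ['`', '`', '`'] then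
      line :: goA (!c) rest
    else if c then
      line :: goA c rest
    else if tableCondA line then
      (if 2 ≤ (line :: rest.takeWhile tableLineA).length then
          [renderA (line :: rest.takeWhile tableLineA)]
        else (line :: rest.takeWhile tableLineA)) ++
        goA c (rest.dropWhile tableLineA)
    else
      line :: goA c rest) := by rw [goA]

-- A, run on a buffered table run followed by lines that do not continue it, emits the flush
lemma goA_flush (buf rest : List (List Char)) (hb : ∀ l ∈ buf, tableLineA l = true)
    (hr : rest.takeWhile tableLineA = []) :
    goA false (buf ++ rest) = flushB buf ++ goA false rest := by
  cases buf with
  | nil => simp [flushB]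
  | cons b0 bt =>
    have hb0 : tableLineA b0 = true := hb b0 (by simp)
    have hbt : ∀ l ∈ bt, tableLineA l = true := fun l hl => hb l (by simp [hl])
    have hdrop : rest.dropWhile tableLineA = rest := by
      cases rest with
      | nil => rfl
      | cons r rt =>
        rw [List.takeWhile_cons] at hr
        split at hr
        · simp at hr
        · rw [List.dropWhile_cons_of_neg (by assumption)]
    rw [List.cons_append, goA_cons, table_not_fence b0 hb0, cond_eq, hb0,
      List.takeWhile_append_of_pos hbt, List.dropWhile_append_of_pos hbt, hr,
      List.append_nil, hdrop]
    simp only [Bool.false_eq_true, if_false, if_true]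
    by_cases hl : 2 ≤ (b0 :: bt).length
    · have hl' : 1 ≤ bt.length := by simp at hl; omega
      simp [flushB, hl', render_eq _ hl]
    · have hl' : ¬ 1 ≤ bt.length := by simp at hl ⊢; omega
      simp [flushB, hl']

lemma loop_eq (rest : List (List Char)) (inCode : Bool) (buf out : List (List Char))
    (hb : ∀ l ∈ buf, tableLineA l = true) (hc : buf ≠ [] → inCode = false) :
    (rest.foldl stepB (inCode, buf, out)).2.2 ++ flushB (rest.foldl stepB (inCode, buf, out)).2.1
      = out ++ goA inCode (buf ++ rest) := by
  induction rest generalizing inCode buf out with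
  | nil =>
    cases buf with
    | nil => simp [goA_nil, flushB]
    | cons b0 bt =>
      have h0 := hc (by simp)
      subst h0
      have h1 := goA_flush (b0 :: bt) [] hb rfl
      rw [List.append_nil, goA_nil, List.append_nil] at h1
      rw [List.foldl_nil, List.append_nil, h1]
  | cons l t ih =>
    rw [List.foldl_cons]
    by_cases hcond : (!inCode && PySem.Chars.startswith (PySem.Chars.strip l) ['|'] &&
        PySem.Chars.endswith (PySem.Chars.strip l) ['|']) = true
    · obtain ⟨⟨hic, hsw⟩, hew⟩ := by simpa [Bool.and_eq_true] using hcond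
      have hic' : inCode = false := by simpa using hic
      subst hic'
      have htl : tableLineA l = true := by simp [tableLineA, hsw, hew]
      have hstep : stepB (false, buf, out) l = (false, buf ++ [l], out) := by
        simp [stepB, hsw, hew]
      rw [hstep, ih false (buf ++ [l]) out
        (fun x hx => by rcases List.mem_append.mp hx with h | h
                        · exact hb x h
                        · simp at h; subst h; exact htl)
        (fun _ => rfl)]
      simp
    · have hstep : stepB (inCode, buf, out) l =
          (if PySem.Chars.startswith (PySem.Chars.strip l) ['`', '`', '`'] then !inCode
            else inCode, [], out ++ flushB buf ++ [l]) := by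
        simp only [stepB]
        rw [if_neg (by simpa using hcond)]
      rw [hstep, ih _ _ _ (by simp) (by simp)]
      have hrhs : goA inCode (buf ++ l :: t) = flushB buf ++ l ::
          goA (if PySem.Chars.startswith (PySem.Chars.strip l) ['`', '`', '`'] then !inCode
            else inCode) t := by
        by_cases hf : PySem.Chars.startswith (PySem.Chars.strip l) ['`', '`', '`'] = true
        · -- fence line: it never continues a table run
          have hnt : tableLineA l = false := by
            by_contra hx
            rw [Bool.not_eq_false] at hx
            exact absurd (table_not_fence l hx) (by simp [hf])
          cases buf with
          | nil => rw [List.nil_append, goA_cons, if_pos hf]; simp [flushB, hf]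
          | cons b0 bt =>
            have h0 := hc (by simp)
            subst h0
            rw [goA_flush (b0 :: bt) (l :: t) hb
              (List.takeWhile_cons_of_neg (by simp [hnt])), goA_cons, if_pos hf]
            simp [hf]
        · by_cases hic : inCode = true
          · have hbuf : buf = [] := by
              cases buf with
              | nil => rfl
              | cons b0 bt => exact absurd (hc (by simp)) (by simp [hic])
            subst hbuf hic
            rw [List.nil_append, goA_cons]
            simp [flushB, hf]
          · have hic' : inCode = false := by simpa using hic
            subst hic'
            have hnt : tableLineA l = false := by
              simpa [tableLineA, Bool.and_eq_true] using hcond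
            cases buf with
            | nil =>
              rw [List.nil_append, goA_cons]
              simp [flushB, hf, cond_eq, hnt]
            | cons b0 bt =>
              rw [goA_flush (b0 :: bt) (l :: t) hb
                (List.takeWhile_cons_of_neg (by simp [hnt])), goA_cons]
              simp [hf, cond_eq, hnt]
      rw [hrhs]
      simp [List.append_assoc]

-- ===== VERDICT (by name: the statement is the Claim_ definition above) =====
theorem convert_pipe_tables_spec : Claim_equal_convert_pipe_tables := by
  intro content _
  unfold Spec_convert_pipe_tables convert_pipe_tables convert_pipe_tables_alt
  have := loop_eq (PySem.Chars.splitOn content.toList ['\n']) false [] [] (by simp) (by simp)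
  simp only [List.nil_append] at this
  exact congrArg (fun l => String.ofList (PySem.Chars.join ['\n'] l)) this.symm
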